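-- pv_equiv track=rewrite | github.com/dheerajck/HackerRank-Problems | set 1/electronics-shop.py | expensive_Keyboard_and_USB_with_in_budget
-- ===== SOURCE A (Python) =====
-- def expensive_Keyboard_and_USB_with_in_budget(keyboards, drives, b):
--
--     # descending sort
--     keyboards.sort(reverse = True)
--     # ascending sort
--     drives.sort()
--     maximum = -1
--
--     ascending_counter = 0
--
--     # m + n iterator
--     for desc_value in keyboards:
--         while ascending_counter < len(drives):
--
--             value_of_products_in_hand = desc_value + drives[ascending_counter]
--
--             if value_of_products_in_hand == b:
--                 return value_of_products_in_hand
--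
--             if value_of_products_in_hand > b:
--                 break
--             if value_of_products_in_hand < b:
--                 maximum = max(maximum, value_of_products_in_hand)
--                 ascending_counter += 1
--
--     return maximum
-- ===== SOURCE B (Python) =====
-- def _bisect_right(a, x):
--     lo = 0
--     hi = len(a)
--     while lo < hi:
--         mid = (lo + hi) // 2
--         if a[mid] <= x:
--             lo = mid + 1
--         else:
--             hi = mid
--     return lo
--
--
-- def expensive_Keyboard_and_USB_with_in_budget(keyboards, drives, b):
--     keyboards.sort(reverse=True)
--     drives.sort()
--     best = -1
--     for k in keyboards:
--         i = _bisect_right(drives, b - k)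
--         if i > 0:
--             s = k + drives[i - 1]
--             if s == b:
--                 return b
--             if s > best:
--                 best = s
--     return best
-- ===== Notes on version B (the rewrite author's own statement) =====
-- stated objective: alternative
-- what changed: Replaces A's shared monotonic two-pointer sweep over the drives with an independent hand-rolled bisect_right binary search into the sorted drives for each keyboard, keeping a running maximum and the early return on an exact budget match.
import Mathlib
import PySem

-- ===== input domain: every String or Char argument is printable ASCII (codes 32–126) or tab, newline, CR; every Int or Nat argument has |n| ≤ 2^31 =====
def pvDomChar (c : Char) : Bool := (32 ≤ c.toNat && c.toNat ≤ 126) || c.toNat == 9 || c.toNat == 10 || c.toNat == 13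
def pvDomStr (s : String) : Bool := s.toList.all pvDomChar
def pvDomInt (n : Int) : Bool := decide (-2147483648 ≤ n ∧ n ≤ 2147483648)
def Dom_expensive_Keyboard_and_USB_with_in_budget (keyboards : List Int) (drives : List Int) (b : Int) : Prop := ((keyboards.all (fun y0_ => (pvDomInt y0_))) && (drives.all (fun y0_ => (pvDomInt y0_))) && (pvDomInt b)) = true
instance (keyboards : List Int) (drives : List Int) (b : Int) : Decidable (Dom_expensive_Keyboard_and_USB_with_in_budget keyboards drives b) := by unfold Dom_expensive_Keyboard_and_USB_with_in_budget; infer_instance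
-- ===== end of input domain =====

-- B replaces A's shared two-pointer sweep by a per-keyboard binary search (hand-rolled
-- bisect_right) into the sorted drives: a genuinely different traversal, similar cost.
-- Both A and B sort the two argument lists in place (same mutation); the equivalence
-- proved here is about the return value.

-- ===== PORT A =====
-- inner while-loop of A: scans drives from index c; returns early value (.inl) or (maximum, counter) (.inr)
def pvInnerA (drs : List Int) (b k m : Int) (c : Nat) : Sum Int (Int × Nat) :=
  if h : c < drs.length then
    let v := k + drs[c]
    if v = b then Sum.inl v
    else if v > b then Sum.inr (m, c)
    else pvInnerA drs b k (max m v) (c + 1)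
  else Sum.inr (m, c)
termination_by drs.length - c

-- outer for-loop of A over the descending keyboards, threading (maximum, ascending_counter)
def pvOuterA (drs : List Int) (b : Int) : List Int → Int → Nat → Int
  | [], m, _ => m
  | k :: ks, m, c =>
    match pvInnerA drs b k m c with
    | Sum.inl v => v
    | Sum.inr (m', c') => pvOuterA drs b ks m' c'

def expensive_Keyboard_and_USB_with_in_budget (keyboards : List Int) (drives : List Int) (b : Int) : Int :=
  let kbs := PySem.List.sorted keyboards (fun x => x) true
  let drs := PySem.List.sorted drives (fun x => x) false
  pvOuterA drs b kbs (-1) 0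

-- ===== PORT B =====
-- hand-written bisect_right of Source B (Source B uses no import)
def pvBisR (a : List Int) (x : Int) (lo hi : Nat) : Nat :=
  if _h : lo < hi then
    let mid := (lo + hi) / 2
    if a.getD mid 0 ≤ x then pvBisR a x (mid + 1) hi
    else pvBisR a x lo mid
  else lo
termination_by hi - lo
decreasing_by all_goals omega

-- B's for-loop: per keyboard, binary-search the largest affordable drive
def pvLoopB (drs : List Int) (b : Int) : List Int → Int → Int
  | [], best => best
  | k :: ks, best =>
    let i := pvBisR drs (b - k) 0 drs.length
    if i > 0 then
      let s := k + drs.getD (i - 1) 0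
      if s = b then b
      else if s > best then pvLoopB drs b ks s
      else pvLoopB drs b ks best
    else pvLoopB drs b ks best

def expensive_Keyboard_and_USB_with_in_budget_alt (keyboards : List Int) (drives : List Int) (b : Int) : Int :=
  let kbs := PySem.List.sorted keyboards (fun x => x) true
  let drs := PySem.List.sorted drives (fun x => x) false
  pvLoopB drs b kbs (-1)

-- ===== PRECONDITION & SPEC =====
def Spec_expensive_Keyboard_and_USB_with_in_budget (keyboards : List Int) (drives : List Int) (b : Int) (out : Int) : Prop := out = expensive_Keyboard_and_USB_with_in_budget_alt keyboards drives b
instance (keyboards : List Int) (drives : List Int) (b : Int) (out : Int) : Decidable (Spec_expensive_Keyboard_and_USB_with_in_budget keyboards drives b out) := by unfold Spec_expensive_Keyboard_and_USB_with_in_budget; infer_instance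

-- ===== CLAIM (what is proved, stated in full; the proofs are below) =====
def Claim_equal_expensive_Keyboard_and_USB_with_in_budget : Prop := ∀ (keyboards : List Int) (drives : List Int) (b : Int), Dom_expensive_Keyboard_and_USB_with_in_budget keyboards drives b → Spec_expensive_Keyboard_and_USB_with_in_budget keyboards drives b (expensive_Keyboard_and_USB_with_in_budget keyboards drives b)

-- ===== LEMMAS AND PROOFS =====

-- monotonicity of a (·≤·)-pairwise-sorted list, by index
lemma pv_sorted_mono (a : List Int) (hs : a.Pairwise (· ≤ ·))
    {i j : Nat} (hij : i ≤ j) (hj : j < a.length) : a[i]'(by omega) ≤ a[j] := by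
  rcases Nat.lt_or_ge i j with h | h
  · exact (List.pairwise_iff_getElem.mp hs) i j (by omega) hj h
  · have : i = j := by omega
    subst this; rfl

-- specification of the hand-rolled bisect_right
lemma pvBisR_spec (a : List Int) (hs : a.Pairwise (· ≤ ·)) (x : Int) :
    ∀ n lo hi, hi - lo ≤ n → lo ≤ hi → hi ≤ a.length →
    (∀ j (hj : j < a.length), j < lo → a[j] ≤ x) →
    (∀ j (hj : j < a.length), hi ≤ j → x < a[j]) →
    lo ≤ pvBisR a x lo hi ∧ pvBisR a x lo hi ≤ hi ∧
    (∀ j (hj : j < a.length), j < pvBisR a x lo hi → a[j] ≤ x) ∧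
    (∀ j (hj : j < a.length), pvBisR a x lo hi ≤ j → x < a[j]) := by
  intro n
  induction n with
  | zero =>
    intro lo hi hn hlohi hlen hlo hhi
    have hlh : lo = hi := by omega
    rw [pvBisR]
    simp only [hlh, lt_irrefl, dite_false]
    exact ⟨by omega, by omega, fun j hj hjl => hlo j hj (by omega), fun j hj hjl => hhi j hj (by omega)⟩
  | succ n ih =>
    intro lo hi hn hlohi hlen hlo hhi
    rw [pvBisR]
    by_cases h : lo < hi
    · simp only [h, dite_true]
      have hmid : (lo + hi) / 2 < a.length := by omega
      have hget : a.getD ((lo + hi) / 2) 0 = a[(lo + hi) / 2] := List.getD_eq_getElem a 0 hmid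
      by_cases hle : a.getD ((lo + hi) / 2) 0 ≤ x
      · simp only [hle, if_true]
        have hlo' : ∀ j (hj : j < a.length), j < (lo + hi) / 2 + 1 → a[j] ≤ x := by
          intro j hj hjl
          rcases Nat.lt_or_ge j lo with h2 | h2
          · exact hlo j hj h2
          · calc a[j] ≤ a[(lo + hi) / 2] := pv_sorted_mono a hs (by omega) hmid
              _ ≤ x := by rw [← hget]; exact hle
        obtain ⟨h1, h2, h3, h4⟩ := ih ((lo + hi) / 2 + 1) hi (by omega) (by omega) hlen hlo' hhi
        exact ⟨by omega, h2, h3, h4⟩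
      · simp only [hle, if_false]
        have hx : x < a[(lo + hi) / 2] := by rw [← hget]; omega
        have hhi' : ∀ j (hj : j < a.length), (lo + hi) / 2 ≤ j → x < a[j] := by
          intro j hj hjl
          calc x < a[(lo + hi) / 2] := hx
            _ ≤ a[j] := pv_sorted_mono a hs hjl hj
        obtain ⟨h1, h2, h3, h4⟩ := ih lo ((lo + hi) / 2) (by omega) (by omega) (by omega) hlo hhi'
        exact ⟨h1, by omega, h3, h4⟩
    · simp only [h, dite_false]
      exact ⟨le_refl lo, by omega, fun j hj hjl => hlo j hj hjl, fun j hj hjl => hhi j hj (by omega)⟩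

-- specification of A's inner while-loop
lemma pvInnerA_spec (drs : List Int) (b k : Int) (hs : drs.Pairwise (· ≤ ·)) :
    ∀ n (m : Int) (c : Nat), drs.length - c ≤ n →
    (∀ i (hi : i < drs.length), i < c → k + drs[i] ≤ m ∧ k + drs[i] < b) →
    ((∃ i, ∃ hi : i < drs.length, k + drs[i] = b) ∧ pvInnerA drs b k m c = Sum.inl b)
    ∨ ((∀ i (hi : i < drs.length), k + drs[i] ≠ b) ∧
       ∃ m' c', pvInnerA drs b k m c = Sum.inr (m', c') ∧ m ≤ m' ∧ c ≤ c' ∧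
         (∀ i (hi : i < drs.length), k + drs[i] < b → k + drs[i] ≤ m') ∧
         (m' = m ∨ ∃ i, ∃ hi : i < drs.length, m' = k + drs[i] ∧ k + drs[i] < b) ∧
         (∀ i (hi : i < drs.length), i < c' → k + drs[i] ≤ m' ∧ k + drs[i] < b)) := by
  intro n
  induction n with
  | zero =>
    intro m c hn hpre
    have hc : ¬ c < drs.length := by omega
    rw [pvInnerA]
    simp only [hc, dite_false]
    refine Or.inr ⟨?_, m, c, rfl, le_refl m, le_refl c, ?_, Or.inl rfl, hpre⟩
    · intro i hi
      exact (hpre i hi (by omega)).2.ne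
    · intro i hi _
      exact (hpre i hi (by omega)).1
  | succ n ih =>
    intro m c hn hpre
    by_cases hc : c < drs.length
    · rw [pvInnerA]
      simp only [hc, dite_true]
      by_cases heq : k + drs[c] = b
      · refine Or.inl ⟨⟨c, hc, heq⟩, ?_⟩
        rw [if_pos heq, heq]
      · simp only [heq, if_false]
        by_cases hgt : k + drs[c] > b
        · simp only [hgt, if_true]
          refine Or.inr ⟨?_, m, c, rfl, le_refl m, le_refl c, ?_, Or.inl rfl, hpre⟩
          · intro i hi
            rcases Nat.lt_or_ge i c with h2 | h2
            · exact (hpre i hi h2).2.ne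
            · have := pv_sorted_mono drs hs h2 hi
              omega
          · intro i hi hib
            rcases Nat.lt_or_ge i c with h2 | h2
            · exact (hpre i hi h2).1
            · have := pv_sorted_mono drs hs h2 hi
              omega
        · simp only [hgt, if_false]
          have hlt : k + drs[c] < b := by omega
          have hpre' : ∀ i (hi : i < drs.length), i < c + 1 →
              k + drs[i] ≤ max m (k + drs[c]) ∧ k + drs[i] < b := by
            intro i hi hic
            rcases Nat.lt_or_ge i c with h2 | h2
            · have := hpre i hi h2
              constructor
              · exact le_trans this.1 (le_max_left _ _)
              · exact this.2
            · have hieq : i = c := by omega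
              subst hieq
              exact ⟨le_max_right _ _, hlt⟩
          rcases ih (max m (k + drs[c])) (c + 1) (by omega) hpre' with h | ⟨hne, m', c', heq2, hm, hcc, hall, hdis, hp⟩
          · exact Or.inl h
          · refine Or.inr ⟨hne, m', c', heq2, le_trans (le_max_left _ _) hm, by omega, hall, ?_, hp⟩
            rcases hdis with hd | hd
            · rcases max_choice m (k + drs[c]) with h3 | h3
              · exact Or.inl (hd.trans h3)
              · exact Or.inr ⟨c, hc, hd.trans h3, hlt⟩
            · exact Or.inr hd
    · rw [pvInnerA]
      simp only [hc, dite_false]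
      refine Or.inr ⟨?_, m, c, rfl, le_refl m, le_refl c, ?_, Or.inl rfl, hpre⟩
      · intro i hi
        exact (hpre i hi (by omega)).2.ne
      · intro i hi _
        exact (hpre i hi (by omega)).1

-- A's outer loop equals B's loop under the sweep invariant
lemma pv_main (drs : List Int) (b : Int) (hs : drs.Pairwise (· ≤ ·)) :
    ∀ (ks : List Int), ks.Pairwise (fun x y => y ≤ x) →
    ∀ (m : Int) (c : Nat), -1 ≤ m →
    (∀ k ∈ ks, ∀ i (hi : i < drs.length), i < c → k + drs[i] ≤ m ∧ k + drs[i] < b) →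
    pvOuterA drs b ks m c = pvLoopB drs b ks m := by
  intro ks
  induction ks with
  | nil => intro _ m c _ _; rfl
  | cons k ks ih =>
    intro hks m c hm hpre
    have hks' : ks.Pairwise (fun x y => y ≤ x) := (List.pairwise_cons.mp hks).2
    have hkhd : ∀ k' ∈ ks, k' ≤ k := (List.pairwise_cons.mp hks).1
    obtain ⟨hlo, hhiB, hble, hbgt⟩ :=
      pvBisR_spec drs hs (b - k) drs.length 0 drs.length (by omega) (by omega) (le_refl _)
        (by omega) (by omega)
    set i := pvBisR drs (b - k) 0 drs.length with hidef
    rcases pvInnerA_spec drs b k hs (drs.length - c) m c (le_refl _)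
        (fun i hi hic => hpre k (by simp) i hi hic) with
      ⟨⟨i0, hi0, hex⟩, hinl⟩ | ⟨hne, m', c', hinr, hmm, hcc, hall, hdis, hp⟩
    · -- exact match: both sides return b
      have hi0i : i0 < i := by
        by_contra h
        have := hbgt i0 hi0 (by omega)
        omega
      have hipos : 0 < i := by omega
      have hsb : k + drs.getD (i - 1) 0 = b := by
        have hi1 : i - 1 < drs.length := by omega
        rw [List.getD_eq_getElem drs 0 hi1]
        have h1 : drs[i0] ≤ drs[i - 1] := pv_sorted_mono drs hs (by omega) hi1
        have h2 : drs[i - 1] ≤ b - k := hble (i - 1) hi1 (by omega)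
        omega
      simp only [pvOuterA, hinl, pvLoopB, ← hidef]
      simp only [hipos, hsb, if_pos]
    · -- no exact match for k: B's update equals A's new maximum m'
      simp only [pvOuterA, hinr, pvLoopB, ← hidef]
      have hm' : -1 ≤ m' := le_trans hm hmm
      have hpre' : ∀ k' ∈ ks, ∀ j (hj : j < drs.length), j < c' →
          k' + drs[j] ≤ m' ∧ k' + drs[j] < b := by
        intro k' hk' j hj hjc
        have h1 := hp j hj hjc
        have h2 := hkhd k' hk'
        exact ⟨by omega, by omega⟩
      by_cases hipos : 0 < i
      · have hi1 : i - 1 < drs.length := by omega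
        have hgd : drs.getD (i - 1) 0 = drs[i - 1] := List.getD_eq_getElem drs 0 hi1
        have hsle : k + drs[i - 1] ≤ b := by
          have := hble (i - 1) hi1 (by omega); omega
        have hsne : k + drs[i - 1] ≠ b := hne (i - 1) hi1
        have hslt : k + drs[i - 1] < b := by omega
        -- m' = max m (k + drs[i-1])
        have hub : m' ≤ max m (k + drs[i - 1]) := by
          rcases hdis with hd | ⟨j, hj, hd, hdlt⟩
          · exact hd ▸ le_max_left _ _
          · have hji : j < i := by
              by_contra h
              have := hbgt j hj (by omega)
              omega
            have : drs[j] ≤ drs[i - 1] := pv_sorted_mono drs hs (by omega) hi1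
            have : k + drs[j] ≤ k + drs[i - 1] := by omega
            omega
        have hlb : max m (k + drs[i - 1]) ≤ m' :=
          max_le hmm (hall (i - 1) hi1 hslt)
        have hmeq : m' = max m (k + drs[i - 1]) := le_antisymm hub hlb
        simp only [hipos, if_true, hgd]
        rw [if_neg hsne]
        by_cases hgt : k + drs[i - 1] > m
        · rw [if_pos hgt, ih hks' m' c' hm' hpre', hmeq]
          congr 1
          omega
        · rw [if_neg hgt, ih hks' m' c' hm' hpre', hmeq]
          congr 1
          omega
      · -- i = 0: no affordable drive for k, m' = m
        have hi0 : i = 0 := by omega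
        have hnone : ∀ j (hj : j < drs.length), b < k + drs[j] := by
          intro j hj
          have := hbgt j hj (by omega)
          omega
        have hmeq : m' = m := by
          rcases hdis with hd | ⟨j, hj, hd, hdlt⟩
          · exact hd
          · have := hnone j hj; omega
        simp only [hipos, if_false]
        rw [ih hks' m' c' hm' hpre', hmeq]

-- ===== VERDICT (by name: the statement is the Claim_ definition above) =====
theorem expensive_Keyboard_and_USB_with_in_budget_spec : Claim_equal_expensive_Keyboard_and_USB_with_in_budget := by
  intro keyboards drives b _
  unfold Spec_expensive_Keyboard_and_USB_with_in_budget
  unfold expensive_Keyboard_and_USB_with_in_budget expensive_Keyboard_and_USB_with_in_budget_alt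
  exact pv_main (PySem.List.sorted drives (fun x => x) false) b
    (PySem.List.sorted_pairwise drives (fun x => x))
    (PySem.List.sorted keyboards (fun x => x) true)
    (PySem.List.sorted_pairwise_rev keyboards (fun x => x))
    (-1) 0 (le_refl _) (by omega)
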